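-- pv_equiv track=rewrite | github.com/yososky/NLP_Course | ngram.py | reshapeText
-- ===== SOURCE A (Python) =====
-- def reshapeText (texts, ngramValue):
--     endingPunctuation = ['.','?','!']  # Each sentance will end with a ending punctution
--     returnText = []
--     line = []
--     for word in texts:
--         line.append(word.lower())  # transfer all words to lower case
--         if word in endingPunctuation:
--             if len(line) >= ngramValue:
--                 line.append('%20e')
--                 returnText.extend(line)
--             line = ['%20s']
--
--     return returnText
-- ===== SOURCE B (Python) =====
-- def reshapeText(texts, ngramValue):
--     # Phase 1: split into lowercased sentences, each closed by '.', '?' or '!';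
--     # trailing words after the last punctuation are discarded.
--     sentences = []
--     cur = []
--     for word in texts:
--         cur.append(word.lower())
--         if word == '.' or word == '?' or word == '!':
--             sentences.append(cur)
--             cur = []
--     # Phase 2: format each sentence; every sentence after the first gets a
--     # '%20s' prefix (counted in the length threshold), '%20e' is appended after.
--     out = []
--     first = True
--     for s in sentences:
--         line = s if first else ['%20s'] + s
--         first = False
--         if len(line) >= ngramValue:
--             out.extend(line)
--             out.append('%20e')
--     return out
-- ===== Notes on version B (the rewrite author's own statement) =====
-- stated objective: alternative
-- what changed: B splits the work into two passes: first collect the lowercased, punctuation-closed sentences, then format each sentence (prefix '%20s' for non-first, length test, '%20e' suffix), instead of A's single loop that interleaves formatting state with scanning.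
import Mathlib
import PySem

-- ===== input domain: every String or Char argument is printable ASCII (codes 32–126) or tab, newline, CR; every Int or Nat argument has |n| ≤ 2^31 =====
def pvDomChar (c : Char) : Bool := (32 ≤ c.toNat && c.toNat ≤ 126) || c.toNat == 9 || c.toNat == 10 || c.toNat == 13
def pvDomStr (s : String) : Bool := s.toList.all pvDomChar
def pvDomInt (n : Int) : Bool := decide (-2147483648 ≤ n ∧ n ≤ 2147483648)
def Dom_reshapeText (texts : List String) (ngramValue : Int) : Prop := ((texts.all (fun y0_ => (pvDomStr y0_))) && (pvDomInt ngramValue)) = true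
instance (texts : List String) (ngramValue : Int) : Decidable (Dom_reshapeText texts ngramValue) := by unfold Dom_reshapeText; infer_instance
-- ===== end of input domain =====

-- B reorganises A's single formatting loop into two passes (collect sentences, then format); same cost, different decomposition.

-- ===== PORT A =====
-- A's loop, state = (returnText, line)
def reshapeGoA (ngramValue : Int) : List String → List String × List String → List String
  | [], (ret, _) => ret
  | w :: ws, (ret, line) =>
    let line' := line ++ [PySem.Str.lower w]
    if w ∈ ([".", "?", "!"] : List String) then
      if (line'.length : Int) ≥ ngramValue then
        reshapeGoA ngramValue ws (ret ++ (line' ++ ["%20e"]), ["%20s"])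
      else
        reshapeGoA ngramValue ws (ret, ["%20s"])
    else
      reshapeGoA ngramValue ws (ret, line')

def reshapeText (texts : List String) (ngramValue : Int) : List String :=
  reshapeGoA ngramValue texts ([], [])

-- ===== PORT B =====
-- Phase 1: collect lowercased sentences closed by ending punctuation (trailing words dropped)
def reshapeCollect : List String → List (List String) → List String → List (List String)
  | [], sentences, _ => sentences
  | w :: ws, sentences, cur =>
    let cur' := cur ++ [PySem.Str.lower w]
    if w = "." ∨ w = "?" ∨ w = "!" then
      reshapeCollect ws (sentences ++ [cur']) []
    else
      reshapeCollect ws sentences cur'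

-- Phase 2: format each sentence; '%20s' prefix for every sentence after the first
def reshapeRender (ngramValue : Int) : List (List String) → Bool → List String → List String
  | [], _, out => out
  | s :: ss, first, out =>
    let line := if first then s else "%20s" :: s
    let out' := if (line.length : Int) ≥ ngramValue then out ++ line ++ ["%20e"] else out
    reshapeRender ngramValue ss false out'

def reshapeText_alt (texts : List String) (ngramValue : Int) : List String :=
  reshapeRender ngramValue (reshapeCollect texts [] []) true []

-- ===== PRECONDITION & SPEC =====
def Spec_reshapeText (texts : List String) (ngramValue : Int) (out : List String) : Prop := out = reshapeText_alt texts ngramValue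
instance (texts : List String) (ngramValue : Int) (out : List String) : Decidable (Spec_reshapeText texts ngramValue out) := by unfold Spec_reshapeText; infer_instance

-- ===== CLAIM (what is proved, stated in full; the proofs are below) =====
def Claim_equal_reshapeText : Prop := ∀ (texts : List String) (ngramValue : Int), Dom_reshapeText texts ngramValue → Spec_reshapeText texts ngramValue (reshapeText texts ngramValue)

-- ===== LEMMAS AND PROOFS =====

theorem reshapeCollect_acc (ws : List String) (sents : List (List String)) (cur : List String) :
    reshapeCollect ws sents cur = sents ++ reshapeCollect ws [] cur := by
  induction ws generalizing sents cur with
  | nil => simp [reshapeCollect]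
  | cons w ws ih =>
    simp only [reshapeCollect]
    split
    · rw [ih (sents ++ _), ih ([] ++ _)]; simp
    · exact ih sents _

theorem reshapeRender_acc (n : Int) (ss : List (List String)) (first : Bool) (out : List String) :
    reshapeRender n ss first out = out ++ reshapeRender n ss first [] := by
  induction ss generalizing first out with
  | nil => simp [reshapeRender]
  | cons s ss ih =>
    simp only [reshapeRender]
    by_cases hc : (((if first then s else "%20s" :: s).length : Int) ≥ n)
    · rw [if_pos hc, if_pos hc, ih false (out ++ _ ++ _), ih false ([] ++ _ ++ _)]
      simp
    · rw [if_neg hc, if_neg hc]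
      exact ih false out

-- the invariant tying A's single-loop state to B's two phases
theorem reshape_main (n : Int) (ws : List String) (ret cur : List String) (first : Bool) :
    reshapeGoA n ws (ret, (if first then [] else ["%20s"]) ++ cur)
      = ret ++ reshapeRender n (reshapeCollect ws [] cur) first [] := by
  induction ws generalizing ret cur first with
  | nil => simp [reshapeGoA, reshapeCollect, reshapeRender]
  | cons w ws ih =>
    simp only [reshapeGoA, reshapeCollect]
    have hmem : (w ∈ ([".", "?", "!"] : List String)) ↔ (w = "." ∨ w = "?" ∨ w = "!") := by
      simp
    by_cases hp : w = "." ∨ w = "?" ∨ w = "!"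
    · rw [if_pos (hmem.mpr hp), if_pos hp]
      simp only [List.nil_append]
      rw [reshapeCollect_acc ws [cur ++ [PySem.Str.lower w]] []]
      simp only [List.singleton_append, reshapeRender]
      have hline : (if first then cur ++ [PySem.Str.lower w]
            else "%20s" :: (cur ++ [PySem.Str.lower w]))
          = (if first then [] else ["%20s"]) ++ cur ++ [PySem.Str.lower w] := by
        cases first <;> simp
      rw [hline]
      by_cases hc : ((((if first then [] else ["%20s"]) ++ cur ++ [PySem.Str.lower w]).length : Int)) ≥ n
      · rw [if_pos hc, if_pos hc,
            reshapeRender_acc n (reshapeCollect ws [] []) false]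
        have h2 := ih (ret ++ ((if first then [] else ["%20s"]) ++ cur ++ [PySem.Str.lower w] ++ ["%20e"])) [] false
        simp only [List.append_nil, Bool.false_eq_true, if_false] at h2
        rw [h2]
        simp
      · rw [if_neg hc, if_neg hc]
        have h3 := ih ret [] false
        simp only [List.append_nil, Bool.false_eq_true, if_false] at h3
        exact h3
    · rw [if_neg (fun h => hp (hmem.mp h)), if_neg hp]
      have h4 := ih ret (cur ++ [PySem.Str.lower w]) first
      rw [← List.append_assoc] at h4
      exact h4

-- ===== VERDICT (by name: the statement is the Claim_ definition above) =====
theorem reshapeText_spec : Claim_equal_reshapeText := by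
  intro texts n _
  unfold Spec_reshapeText reshapeText reshapeText_alt
  have := reshape_main n texts [] [] true
  simpa using this
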